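-- pv_equiv track=rewrite | github.com/AlvieSpurlock/MathCore | MathCore/MathTypes/Advanced/Topology.py | IsT1
-- ===== SOURCE A (Python) =====
-- import itertools   # combinations, product
--
-- def _fs(s):
--     """Convert any iterable to frozenset."""
--     return frozenset(s)
--
-- def IsT1(points, open_sets):
--     pts = list(points)
--     for x, y in itertools.combinations(pts, 2):
--         x_has = any(x in _fs(U) and y not in _fs(U) for U in open_sets)
--         y_has = any(y in _fs(U) and x not in _fs(U) for U in open_sets)
--         if not (x_has and y_has):
--             return False                                       # One point not separately open
--     return True                                               # T1 holds
-- ===== SOURCE B (Python) =====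
-- def IsT1(points, open_sets):
--     # For each point x, intersect all open sets containing x; T1 holds iff
--     # exactly one listed point (x itself, once) survives in that intersection.
--     pts = list(points)
--     sets = [frozenset(U) for U in open_sets]
--     for x in pts:
--         Ux = [U for U in sets if x in U]
--         if Ux:
--             inter = Ux[0]
--             for U in Ux[1:]:
--                 inter = inter & U
--             cnt = sum(1 for y in pts if y in inter)
--         else:
--             cnt = len(pts)
--         if cnt != 1:
--             return False
--     return True
-- ===== Notes on version B (the rewrite author's own statement) =====
-- stated objective: alternative
-- what changed: Instead of testing every ordered pair of points against every open set, B computes for each point the intersection of all open sets containing it once and checks that exactly one listed point survives, replacing the quadratic pair enumeration by a per-point intersection pass (asymptotically fewer set scans on T1-like inputs, but random inputs fail early for both, so no measured speed-up).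
import Mathlib
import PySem

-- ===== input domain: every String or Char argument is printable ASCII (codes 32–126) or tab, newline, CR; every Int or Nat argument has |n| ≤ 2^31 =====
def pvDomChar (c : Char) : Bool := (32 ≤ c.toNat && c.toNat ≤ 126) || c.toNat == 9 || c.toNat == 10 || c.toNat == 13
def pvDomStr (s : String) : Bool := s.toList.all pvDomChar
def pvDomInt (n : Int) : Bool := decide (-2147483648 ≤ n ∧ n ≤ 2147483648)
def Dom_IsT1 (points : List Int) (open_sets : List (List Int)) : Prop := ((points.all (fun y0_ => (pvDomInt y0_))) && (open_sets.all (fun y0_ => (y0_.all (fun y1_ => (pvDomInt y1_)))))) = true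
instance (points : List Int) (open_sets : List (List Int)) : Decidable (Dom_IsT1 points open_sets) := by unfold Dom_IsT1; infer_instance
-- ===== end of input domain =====

-- B replaces A's pair-by-pair search by one pass that, for each point, intersects
-- the open sets containing it and counts the surviving points (objective: alternative).

-- ===== PORT A =====
-- itertools.combinations(pts, 2), in order
def pvComb2 (l : List Int) : List (Int × Int) :=
  match l with
  | [] => []
  | x :: xs => xs.map (fun y => (x, y)) ++ pvComb2 xs

def IsT1 (points : List Int) (open_sets : List (List Int)) : Bool :=
  (pvComb2 points).all (fun p =>
    (open_sets.any (fun U => U.contains p.1 && !(U.contains p.2))) &&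
    (open_sets.any (fun U => U.contains p.2 && !(U.contains p.1))))

-- ===== PORT B =====
def IsT1_alt (points : List Int) (open_sets : List (List Int)) : Bool :=
  points.all (fun x =>
    let Ux := open_sets.filter (fun U => U.contains x)
    let cnt : Nat :=
      match Ux with
      | [] => points.length
      | U0 :: rest =>
          let inter := rest.foldl (fun acc U => acc.filter (fun y => U.contains y)) U0
          (points.filter (fun y => inter.contains y)).length
    cnt == 1)

-- ===== PRECONDITION & SPEC =====
def Spec_IsT1 (points : List Int) (open_sets : List (List Int)) (out : Bool) : Prop := out = IsT1_alt points open_sets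
instance (points : List Int) (open_sets : List (List Int)) (out : Bool) : Decidable (Spec_IsT1 points open_sets out) := by unfold Spec_IsT1; infer_instance

-- ===== CLAIM (what is proved, stated in full; the proofs are below) =====
def Claim_equal_IsT1 : Prop := ∀ (points : List Int) (open_sets : List (List Int)), Dom_IsT1 points open_sets → Spec_IsT1 points open_sets (IsT1 points open_sets)

-- ===== LEMMAS AND PROOFS =====

-- "some open set contains x but not y"
def pvSep (open_sets : List (List Int)) (x y : Int) : Bool :=
  open_sets.any (fun U => U.contains x && !(U.contains y))

lemma pvSep_self (os : List (List Int)) (x : Int) : pvSep os x x = false := by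
  simp [pvSep]

-- membership in the folded intersection
lemma pvInter_contains (rest : List (List Int)) (U0 : List Int) (y : Int) :
    ((rest.foldl (fun acc U => acc.filter (fun z => U.contains z)) U0).contains y)
      = (U0.contains y && rest.all (fun U => U.contains y)) := by
  induction rest generalizing U0 with
  | nil => simp
  | cons U us ih =>
      rw [List.foldl_cons, ih]
      by_cases h0 : y ∈ U0 <;> by_cases h1 : y ∈ U <;>
        simp [List.mem_filter, h0, h1]

-- the "all open sets containing x also contain y" test is ¬ pvSep
lemma pvAll_filter_eq (os : List (List Int)) (x y : Int) :
    ((os.filter (fun U => U.contains x)).all (fun U => U.contains y)) = !(pvSep os x y) := by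
  rw [Bool.eq_iff_iff]
  simp [pvSep]
  constructor
  · intro h U hU hx
    rcases h U hU with h' | h'
    · exact absurd hx h'
    · exact h'
  · intro h U hU
    by_cases hx : x ∈ U
    · exact Or.inr (h U hU hx)
    · exact Or.inl hx

-- B in normal form: a countP over the points
lemma IsT1_alt_eq (points : List Int) (os : List (List Int)) :
    IsT1_alt points os
      = points.all (fun x => points.countP (fun y => !(pvSep os x y)) == 1) := by
  unfold IsT1_alt
  congr 1
  funext x
  rcases hU : os.filter (fun U => U.contains x) with _ | ⟨U0, rest⟩
  · simp only [hU]
    have : ∀ y : Int, (!(pvSep os x y)) = true := by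
      intro y
      rw [← pvAll_filter_eq, hU]; rfl
    simp [List.countP_eq_length.mpr (fun y _ => this y)]
  · simp only [hU]
    have hmem : ∀ y : Int,
        ((rest.foldl (fun acc U => acc.filter (fun z => U.contains z)) U0).contains y)
          = !(pvSep os x y) := by
      intro y
      rw [pvInter_contains, ← pvAll_filter_eq os x y, hU]
      simp [List.all_cons]
    simp only [hmem, ← List.countP_eq_length_filter]

-- A in normal form: Pairwise over the points
lemma IsT1_eq (points : List Int) (os : List (List Int)) :
    (IsT1 points os = true)
      ↔ points.Pairwise (fun a b => pvSep os a b = true ∧ pvSep os b a = true) := by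
  unfold IsT1
  rw [List.all_eq_true]
  induction points with
  | nil => simp [pvComb2]
  | cons a l ih =>
      simp only [pvComb2, List.mem_append, List.mem_map, List.pairwise_cons]
      constructor
      · intro h
        refine ⟨fun y hy => ?_, ih.mp (fun p hp => h p (Or.inr hp)) ⟩
        have := h (a, y) (Or.inl ⟨y, hy, rfl⟩)
        simpa [pvSep, Bool.and_eq_true] using this
      · rintro ⟨h1, h2⟩ p hp
        rcases hp with ⟨y, hy, rfl⟩ | hp
        · rcases h1 y hy with ⟨s1, s2⟩
          simp [pvSep] at s1 s2 ⊢
          exact ⟨s1, s2⟩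
        · exact ih.mpr h2 p hp

-- core combinatorial equivalence
lemma pvKey (os : List (List Int)) (l : List Int) :
    l.Pairwise (fun a b => pvSep os a b = true ∧ pvSep os b a = true)
      ↔ (∀ x ∈ l, l.countP (fun y => !(pvSep os x y)) = 1) := by
  induction l with
  | nil => simp
  | cons a l ih =>
      simp only [List.pairwise_cons, List.countP_cons, List.mem_cons]
      constructor
      · rintro ⟨ha, hl⟩ x hx
        rcases hx with rfl | hx
        · have hz : l.countP (fun y => !(pvSep os x y)) = 0 := by
            rw [List.countP_eq_zero]
            intro y hy
            simpa using (ha y hy).1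
          simp [hz, pvSep_self]
        · have hxa : pvSep os x a = true := (ha x hx).2
          have := (ih.mp hl) x hx
          simp [hxa, this]
      · intro h
        have hcl : ∀ x ∈ l, l.countP (fun y => !(pvSep os x y)) = 1 := by
          intro x hx
          have hx1 := h x (Or.inr hx)
          cases hxa : pvSep os x a with
          | true => simpa [hxa] using hx1
          | false =>
              simp [hxa] at hx1
              exact absurd (hx1 x hx) (by simp [pvSep_self])
        have haz : l.countP (fun y => !(pvSep os a y)) = 0 := by
          have := h a (Or.inl rfl)
          simpa [pvSep_self] using this
        refine ⟨fun y hy => ⟨?_, ?_⟩, ih.mpr hcl⟩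
        · have := List.countP_eq_zero.mp haz y hy
          simpa using this
        · by_contra hya
          rw [Bool.not_eq_true] at hya
          have := h y (Or.inr hy)
          simp [hya] at this
          exact absurd (this y hy) (by simp [pvSep_self])

-- ===== VERDICT (by name: the statement is the Claim_ definition above) =====
theorem IsT1_spec : Claim_equal_IsT1 := by
  intro points os _
  unfold Spec_IsT1
  rw [Bool.eq_iff_iff, IsT1_eq, IsT1_alt_eq, List.all_eq_true, pvKey]
  constructor
  · intro h x hx; simpa using h x hx
  · intro h x hx; simpa using h x hx
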